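-- pv_equiv track=rewrite | github.com/Maximus231/EnglishTutorTelegram | tests.py | obtain_substring_with_extra_word
-- ===== SOURCE A (Python) =====
-- def obtain_substring_with_extra_word(original_string, a, b):
--     # Split the original string into words
--     words = original_string.split()
--
--     # Find the start index of the substring
--     start_index = 0
--     current_char_count = 0
--     for i, word in enumerate(words):
--         if current_char_count + len(word) >= a:
--             start_index = i
--             break
--         current_char_count += len(word) + 1  # Account for the space between words
--
--     # Find the end index of the substring
--     end_index = len(words) - 1
--     current_char_count = 0
--     for i, word in enumerate(words[start_index:], start=start_index):
--         if current_char_count + len(word) >= b: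
--             end_index = i
--             break
--         current_char_count += len(word) + 1  # Account for the space between words
--
--     # Adjust start and end indexes to include one more word from the left and right
--     start_index = max(0, start_index - 1)
--     end_index = min(len(words) - 1, end_index + 1)
--
--     # Construct the new substring
--     new_substring = ' '.join(words[start_index:end_index + 1])
--
--     return new_substring
--
-- original_string = "This is an example string to demonstrate the function."
--
-- a = 8  # Index indicating the start of the substring
--
-- b = 14  # Index indicating the end of the substring
--
-- new_substring = obtain_substring_with_extra_word(original_string, a, b)
-- ===== SOURCE B (Python) =====
-- def obtain_substring_with_extra_word(original_string, a, b):
--     # Prefix table of cumulative end positions + binary search, instead of two linear scans.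
--     words = original_string.split()
--     n = len(words)
--
--     ends = []
--     total = 0
--     for w in words:
--         total += len(w)
--         ends.append(total)
--         total += 1  # the space after the word
--
--     def bisect_left(arr, t):
--         lo, hi = 0, len(arr)
--         while lo < hi:
--             mid = (lo + hi) // 2
--             if arr[mid] < t:
--                 lo = mid + 1
--             else:
--                 hi = mid
--         return lo
--
--     start_index = bisect_left(ends, a)
--     if start_index == n:
--         start_index = 0  # original default when no word reaches a
--
--     offset = ends[start_index - 1] + 1 if start_index > 0 else 0
--     end_index = max(start_index, bisect_left(ends, b + offset))
--     if end_index == n: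
--         end_index = n - 1  # original default when no word reaches b
--
--     lo = max(0, start_index - 1)
--     hi = min(n - 1, end_index + 1)
--     return ' '.join(words[lo:hi + 1])
-- ===== Notes on version B (the rewrite author's own statement) =====
-- stated objective: alternative
-- what changed: Replaces A's two break-on-threshold counting scans with a prefix table of cumulative word end-positions queried by hand-written binary search (clamped and remapped to reproduce A's default indices).
import Mathlib
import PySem

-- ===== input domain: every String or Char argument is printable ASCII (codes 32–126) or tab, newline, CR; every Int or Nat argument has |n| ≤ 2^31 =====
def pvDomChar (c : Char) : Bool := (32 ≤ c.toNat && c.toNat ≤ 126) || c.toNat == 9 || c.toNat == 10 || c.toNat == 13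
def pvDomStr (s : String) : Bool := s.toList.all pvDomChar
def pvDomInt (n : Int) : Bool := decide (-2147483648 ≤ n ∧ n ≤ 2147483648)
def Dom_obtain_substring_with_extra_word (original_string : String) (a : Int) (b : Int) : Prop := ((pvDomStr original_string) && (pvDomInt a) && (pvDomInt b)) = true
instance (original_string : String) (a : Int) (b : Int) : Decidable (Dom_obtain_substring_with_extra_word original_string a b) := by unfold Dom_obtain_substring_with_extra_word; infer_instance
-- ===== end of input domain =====

-- B replaces A's two counting scans with a prefix table of word end-positions plus binary search (alternative decomposition).

-- ===== PORT A =====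
-- first loop: running char count; start_index stays 0 when no word reaches `a`
def pvLoopStart (ws : List String) (i : Nat) (cnt : Int) (a : Int) : Nat :=
  match ws with
  | [] => 0
  | w :: rest =>
    if a ≤ cnt + PySem.Str.len w then i
    else pvLoopStart rest (i + 1) (cnt + PySem.Str.len w + 1) a

-- second loop over words[start_index:], enumerate start=start_index, default len(words)-1
def pvLoopEnd (ws : List String) (i : Nat) (cnt : Int) (b : Int) (dflt : Int) : Int :=
  match ws with
  | [] => dflt
  | w :: rest =>
    if b ≤ cnt + PySem.Str.len w then (i : Int)
    else pvLoopEnd rest (i + 1) (cnt + PySem.Str.len w + 1) b dflt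

def obtain_substring_with_extra_word (original_string : String) (a : Int) (b : Int) : String :=
  let words := PySem.Str.split₀ original_string
  let start_index := pvLoopStart words 0 0 a
  let end_index := pvLoopEnd (PySem.List.slice words (some (start_index : Int)) none) start_index 0 b (PySem.List.len words - 1)
  let start2 : Int := max 0 ((start_index : Int) - 1)
  let end2 : Int := min (PySem.List.len words - 1) (end_index + 1)
  PySem.Str.join " " (PySem.List.slice words (some start2) (some (end2 + 1)))

-- ===== PORT B =====
-- ends[i] = cumulative end-character-position of word i
def pvEnds (ws : List String) (total : Int) : List Int :=
  match ws with
  | [] => []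
  | w :: rest => (total + PySem.Str.len w) :: pvEnds rest (total + PySem.Str.len w + 1)

-- Source B's hand-written bisect_left while-loop (arr[mid] is always in range; default 0 is never read)
def pvBisect (arr : List Int) (t : Int) (lo hi : Nat) : Nat :=
  if _h : lo < hi then
    let mid := (lo + hi) / 2
    if PySem.List.pyGetD arr (mid : Int) 0 < t then pvBisect arr t (mid + 1) hi
    else pvBisect arr t lo mid
  else lo
termination_by hi - lo
decreasing_by all_goals omega

def obtain_substring_with_extra_word_alt (original_string : String) (a : Int) (b : Int) : String :=
  let words := PySem.Str.split₀ original_string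
  let n := words.length
  let ends := pvEnds words 0
  let si0 := pvBisect ends a 0 ends.length
  let si := if si0 = n then 0 else si0
  let offset : Int := if 0 < si then PySem.List.pyGetD ends ((si : Int) - 1) 0 + 1 else 0
  let ei0 := max si (pvBisect ends (b + offset) 0 ends.length)
  let ei : Int := if ei0 = n then (n : Int) - 1 else (ei0 : Int)
  let lo : Int := max 0 ((si : Int) - 1)
  let hi : Int := min ((n : Int) - 1) (ei + 1)
  PySem.Str.join " " (PySem.List.slice words (some lo) (some (hi + 1)))

-- ===== PRECONDITION & SPEC =====
def Spec_obtain_substring_with_extra_word (original_string : String) (a : Int) (b : Int) (out : String) : Prop := out = obtain_substring_with_extra_word_alt original_string a b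
instance (original_string : String) (a : Int) (b : Int) (out : String) : Decidable (Spec_obtain_substring_with_extra_word original_string a b out) := by unfold Spec_obtain_substring_with_extra_word; infer_instance

-- ===== CLAIM (what is proved, stated in full; the proofs are below) =====
def Claim_equal_obtain_substring_with_extra_word : Prop := ∀ (original_string : String) (a : Int) (b : Int), Dom_obtain_substring_with_extra_word original_string a b → Spec_obtain_substring_with_extra_word original_string a b (obtain_substring_with_extra_word original_string a b)

-- ===== LEMMAS AND PROOFS =====

-- index of the first entry ≥ t (= length when there is none)
def pvFirst (l : List Int) (t : Int) : Nat := l.findIdx (fun x => decide (t ≤ x))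

theorem pvEnds_length (ws : List String) (c : Int) : (pvEnds ws c).length = ws.length := by
  induction ws generalizing c with
  | nil => rfl
  | cons w rest ih => simp [pvEnds, ih]

theorem pvEnds_ge (ws : List String) (c : Int) : ∀ x ∈ pvEnds ws c, c ≤ x := by
  induction ws generalizing c with
  | nil => simp [pvEnds]
  | cons w rest ih =>
    intro x hx
    have hlen : (0 : Int) ≤ PySem.Str.len w := by simp [PySem.Str.len_eq]
    simp only [pvEnds, List.mem_cons] at hx
    rcases hx with h | h
    · omega
    · have := ih (c + PySem.Str.len w + 1) x h; omega

theorem pvEnds_pairwise (ws : List String) (c : Int) : (pvEnds ws c).Pairwise (· < ·) := by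
  induction ws generalizing c with
  | nil => simp [pvEnds]
  | cons w rest ih =>
    refine List.Pairwise.cons ?_ (ih _)
    intro x hx
    have := pvEnds_ge rest (c + PySem.Str.len w + 1) x hx
    omega

theorem pvEnds_shift (ws : List String) (c d : Int) :
    pvEnds ws (c + d) = (pvEnds ws c).map (· + d) := by
  induction ws generalizing c with
  | nil => rfl
  | cons w rest ih =>
    simp only [pvEnds, List.map_cons]
    congr 1
    · ring
    · have h2 : c + d + PySem.Str.len w + 1 = (c + PySem.Str.len w + 1) + d := by ring
      rw [h2, ih]

-- the offset Source B computes: cumulative char count consumed before word k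
def pvOff (l : List Int) (k : Nat) (c : Int) : Int := if k = 0 then c else l.getD (k - 1) 0 + 1

theorem pvEnds_drop (ws : List String) (c : Int) (k : Nat) (hk : k ≤ ws.length) :
    pvEnds (ws.drop k) (pvOff (pvEnds ws c) k c) = (pvEnds ws c).drop k := by
  induction ws generalizing c k with
  | nil => simp [pvEnds]
  | cons w rest ih =>
    cases k with
    | zero => simp [pvOff]
    | succ k' =>
      have hk' : k' ≤ rest.length := by simpa using hk
      have hoff : pvOff (pvEnds (w :: rest) c) (k' + 1) c
          = pvOff (pvEnds rest (c + PySem.Str.len w + 1)) k' (c + PySem.Str.len w + 1) := by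
        cases k' with
        | zero => simp [pvOff, pvEnds]
        | succ m => simp [pvOff, pvEnds]
      show pvEnds (rest.drop k') _ = (pvEnds (w :: rest) c).drop (k' + 1)
      rw [hoff]
      simpa [pvEnds] using ih (c + PySem.Str.len w + 1) k' hk'

theorem pvFirst_le (l : List Int) (t : Int) : pvFirst l t ≤ l.length :=
  List.findIdx_le_length

theorem pvFirst_lt (l : List Int) (t : Int) (k : Nat) (hk : k < l.length)
    (h : k < pvFirst l t) : l[k] < t := by
  have := List.not_of_lt_findIdx (p := fun x => decide (t ≤ x)) (i := k) h
  simp at this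
  omega

theorem pvFirst_ge (l : List Int) (t : Int) (hp : l.Pairwise (· < ·)) (k : Nat)
    (hk : k < l.length) (h : pvFirst l t ≤ k) : t ≤ l[k] := by
  have hF : pvFirst l t < l.length := lt_of_le_of_lt h hk
  have hpF : t ≤ l[pvFirst l t] := by
    have := List.findIdx_getElem (p := fun x => decide (t ≤ x)) (xs := l) (w := hF)
    simpa using this
  rcases Nat.eq_or_lt_of_le h with heq | hlt
  · subst heq; exact hpF
  · have := (List.pairwise_iff_getElem.mp hp) (pvFirst l t) k hF hk hlt
    omega

theorem pvFirst_shift (l : List Int) (t d : Int) :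
    pvFirst (l.map (· + d)) (t + d) = pvFirst l t := by
  unfold pvFirst
  rw [List.findIdx_map]
  congr 1
  funext x
  simp only [Function.comp]
  by_cases h : t ≤ x <;> simp [h]

-- Source B's binary search lands on the first entry ≥ t
theorem pvBisect_eval (arr : List Int) (t : Int) (lo hi : Nat)
    (h2 : ∀ k (hk : k < arr.length), k < pvFirst arr t → arr[k] < t)
    (h3 : ∀ k (hk : k < arr.length), pvFirst arr t ≤ k → t ≤ arr[k])
    (hlo : lo ≤ pvFirst arr t) (hhi : pvFirst arr t ≤ hi) (hlen : hi ≤ arr.length) :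
    pvBisect arr t lo hi = pvFirst arr t := by
  induction lo, hi using pvBisect.induct arr t with
  | case1 lo hi h mid hcond ih =>
    have hmid : mid = (lo + hi) / 2 := rfl
    have hmlen : mid < arr.length := by omega
    rw [hmid] at hcond
    have hcg := hcond
    rw [PySem.List.pyGetD_natCast, List.getD_eq_getElem _ _ (hmid ▸ hmlen)] at hcg
    have hFm : (lo + hi) / 2 < pvFirst arr t := by
      by_contra hcon
      have := h3 ((lo + hi) / 2) (hmid ▸ hmlen) (by omega)
      omega
    rw [pvBisect]
    simp only [h, ↓reduceDIte, hcond, ↓reduceIte]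
    exact ih (by omega) hhi hlen
  | case2 lo hi h mid hcond ih =>
    have hmid : mid = (lo + hi) / 2 := rfl
    have hmlen : mid < arr.length := by omega
    rw [hmid] at hcond
    have hcg := hcond
    rw [PySem.List.pyGetD_natCast, List.getD_eq_getElem _ _ (hmid ▸ hmlen)] at hcg
    have hFm : pvFirst arr t ≤ (lo + hi) / 2 := by
      by_contra hcon
      exact hcg (h2 ((lo + hi) / 2) (hmid ▸ hmlen) (by omega))
    rw [pvBisect]
    simp only [h, ↓reduceDIte, hcond, ↓reduceIte]
    exact ih hlo hFm (by omega)
  | case3 lo hi h =>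
    rw [pvBisect]
    simp only [h, ↓reduceDIte]
    omega

-- A's first loop finds the first word whose end position reaches a (default 0)
theorem pvLoopStart_eq (ws : List String) (i : Nat) (c : Int) (a : Int) :
    pvLoopStart ws i c a =
      (if pvFirst (pvEnds ws c) a = ws.length then 0 else i + pvFirst (pvEnds ws c) a) := by
  induction ws generalizing i c with
  | nil => simp [pvLoopStart, pvFirst, pvEnds]
  | cons w rest ih =>
    simp only [pvLoopStart, pvEnds, pvFirst, List.findIdx_cons]
    by_cases hcond : a ≤ c + PySem.Str.len w
    · rw [if_pos hcond]
      simp only [decide_eq_true hcond, cond_true, List.length_cons]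
      simp
    · rw [if_neg hcond]
      simp only [decide_eq_false hcond, cond_false, List.length_cons]
      rw [ih (i + 1) (c + PySem.Str.len w + 1)]
      unfold pvFirst
      split_ifs <;> omega

-- A's second loop, same characterization with an arbitrary default
theorem pvLoopEnd_eq (ws : List String) (i : Nat) (c : Int) (b d : Int) :
    pvLoopEnd ws i c b d =
      (if pvFirst (pvEnds ws c) b = ws.length then d else (i : Int) + (pvFirst (pvEnds ws c) b : Int)) := by
  induction ws generalizing i c with
  | nil => simp [pvLoopEnd, pvFirst, pvEnds]
  | cons w rest ih =>
    simp only [pvLoopEnd, pvEnds, pvFirst, List.findIdx_cons]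
    by_cases hcond : b ≤ c + PySem.Str.len w
    · rw [if_pos hcond]
      simp only [decide_eq_true hcond, cond_true, List.length_cons]
      simp
    · rw [if_neg hcond]
      simp only [decide_eq_false hcond, cond_false, List.length_cons]
      rw [ih (i + 1) (c + PySem.Str.len w + 1)]
      unfold pvFirst
      split_ifs <;> omega

-- clamped full-list search = k + search restricted to the tail from k (sorted list)
theorem pvFirst_drop (l : List Int) (t : Int) (hp : l.Pairwise (· < ·)) (k : Nat)
    (hk : k ≤ l.length) :
    max k (pvFirst l t) = k + pvFirst (l.drop k) t := by
  by_cases hF : pvFirst l t ≤ k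
  · have hd0 : pvFirst (l.drop k) t = 0 := by
      rcases Nat.eq_or_lt_of_le hk with heq | hlt
      · unfold pvFirst
        rw [List.drop_of_length_le (by omega)]
        rfl
      · have hdk : 0 < (l.drop k).length := by simp; omega
        have hgek : t ≤ l[k] := pvFirst_ge l t hp k hlt hF
        unfold pvFirst
        rw [List.findIdx_eq hdk]
        refine ⟨?_, by omega⟩
        rw [List.getElem_drop]
        simpa using hgek
    omega
  · have hFle : pvFirst l t ≤ l.length := pvFirst_le l t
    have hd : pvFirst (l.drop k) t = pvFirst l t - k := by
      rcases Nat.eq_or_lt_of_le hFle with heq | hFlt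
      · -- no entry reaches t at all
        have hall : pvFirst (l.drop k) t = (l.drop k).length := by
          unfold pvFirst
          rw [List.findIdx_eq_length]
          intro x hx
          obtain ⟨j, hj, hxj⟩ := List.mem_iff_getElem.mp hx
          have hjl : k + j < l.length := by
            have := hj; simp at this; omega
          have : l[k + j] < t := pvFirst_lt l t (k + j) hjl (by omega)
          rw [List.getElem_drop] at hxj
          subst hxj
          simpa using this
        rw [hall]
        simp
        omega
      · have hsub : pvFirst l t - k < (l.drop k).length := by simp; omega
        have hkF : k + (pvFirst l t - k) = pvFirst l t := by omega
        show List.findIdx (fun x => decide (t ≤ x)) (l.drop k) = pvFirst l t - k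
        rw [List.findIdx_eq hsub]
        constructor
        · rw [List.getElem_drop]
          simp only [hkF]
          simpa using pvFirst_ge l t hp (pvFirst l t) hFlt le_rfl
        · intro j hj
          rw [List.getElem_drop]
          have hjl : k + j < l.length := by omega
          have : l[k + j] < t := pvFirst_lt l t (k + j) hjl (by omega)
          simpa using this
    omega

theorem obtain_substring_with_extra_word_spec : Claim_equal_obtain_substring_with_extra_word := by
  intro s a b _
  unfold Spec_obtain_substring_with_extra_word
  unfold obtain_substring_with_extra_word obtain_substring_with_extra_word_alt
  simp only [PySem.List.len_eq]
  set ws := PySem.Str.split₀ s with hws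
  set n := ws.length with hn
  set ends := pvEnds ws 0 with hends
  have hlen : ends.length = n := by rw [hends, hn]; exact pvEnds_length ws 0
  have hp : ends.Pairwise (· < ·) := by rw [hends]; exact pvEnds_pairwise ws 0
  have hbis : ∀ t : Int, pvBisect ends t 0 ends.length = pvFirst ends t := fun t =>
    pvBisect_eval ends t 0 ends.length (pvFirst_lt ends t) (pvFirst_ge ends t hp)
      (Nat.zero_le _) (pvFirst_le ends t) le_rfl
  have hstart : pvLoopStart ws 0 0 a
      = (if pvBisect ends a 0 ends.length = n then 0 else pvBisect ends a 0 ends.length) := by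
    rw [pvLoopStart_eq, hbis a, ← hends, ← hn]
    simp
  rw [hstart]
  set si := (if pvBisect ends a 0 ends.length = n then 0 else pvBisect ends a 0 ends.length) with hsidef
  have hsiF : si = (if pvFirst ends a = n then 0 else pvFirst ends a) := by rw [hsidef, hbis a]
  have hFle : pvFirst ends a ≤ n := hlen ▸ pvFirst_le ends a
  have hsile : si ≤ n := by rw [hsiF]; split <;> omega
  set off : Int := pvOff ends si 0 with hoffdef
  have hoffB : (if 0 < si then PySem.List.pyGetD ends ((si : Int) - 1) 0 + 1 else 0) = off := by
    rw [hoffdef]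
    unfold pvOff
    by_cases h0 : si = 0
    · simp [h0]
    · have h0' : 0 < si := by omega
      have hc : ((si : Int) - 1) = ((si - 1 : Nat) : Int) := by omega
      rw [if_pos h0', if_neg h0, hc, PySem.List.pyGetD_natCast]
  have hdropE : pvEnds (ws.drop si) off = ends.drop si := by
    rw [hoffdef, hends]
    exact pvEnds_drop ws 0 si (by omega)
  have hshift : pvEnds (ws.drop si) off = (pvEnds (ws.drop si) 0).map (· + off) := by
    have := pvEnds_shift (ws.drop si) 0 off
    simpa using this
  set G := pvFirst (pvEnds (ws.drop si) 0) b with hGdef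
  have hG2 : pvFirst (ends.drop si) (b + off) = G := by
    rw [← hdropE, hshift, pvFirst_shift, hGdef]
  have hGle : G ≤ n - si := by
    have h1 := pvFirst_le (pvEnds (ws.drop si) 0) b
    rw [pvEnds_length, List.length_drop] at h1
    rw [hGdef]
    omega
  have hmax : max si (pvFirst ends (b + off)) = si + G := by
    rw [pvFirst_drop ends (b + off) hp si (by omega), hG2]
  have hend : pvLoopEnd (PySem.List.slice ws (some ((si : Nat) : Int)) none) si 0 b ((n : Int) - 1)
      = (if (max si (pvBisect ends (b + (if 0 < si then PySem.List.pyGetD ends ((si : Int) - 1) 0 + 1 else 0)) 0 ends.length)) = n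
          then (n : Int) - 1
          else ((max si (pvBisect ends (b + (if 0 < si then PySem.List.pyGetD ends ((si : Int) - 1) 0 + 1 else 0)) 0 ends.length) : Nat) : Int)) := by
    rw [hoffB, hbis (b + off), hmax, PySem.List.slice_from_natCast, pvLoopEnd_eq, ← hGdef,
      List.length_drop, ← hn]
    by_cases hc : G = n - si
    · rw [if_pos hc, if_pos (by omega)]
    · rw [if_neg hc, if_neg (by omega)]
      push_cast
      omega
  rw [hend]
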